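-- pv_equiv track=rewrite | github.com/fanscribed/fanscribed | fanscribed/transcripts.py | normalized_text
-- ===== SOURCE A (Python) =====
-- def dialogue_list(original_text):
--     """Return a list of dialogue parts for the given original text.
--
--     Each dialogue part is a dictionary::
--
--         dict(
--             abbreviation=ABBREVIATION,
--             lines=[
--                 SPOKEN_TEXT_LINE,
--                 ...
--             ],
--         )
--     """
--     def append_line(text):
--         current_part['lines'].append(text)
--     def append_part_if_not_empty():
--         if current_part['lines']:
--             parts.append(current_part)
--     def new_part(abbreviation=None):
--         return dict(
--             abbreviation=abbreviation,
--             lines=[],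
--         )
--     parts = []
--     current_part = new_part()
--     for line in original_text.splitlines():
--         line = line.strip()
--         if u';' not in line:
--             # Only text was given.
--             abbreviation = current_part['abbreviation'] or None
--             text = line.strip()
--         else:
--             # Speaker abbreviation and text were given.
--             abbreviation, text = line.split(u';', 1)
--             abbreviation = abbreviation.strip() or None
--             text = text.strip()
--         #
--         if not text:
--             # Skip blank line.
--             continue
--         else:
--             # Process non-blank line.
--             pass
--         #
--         if abbreviation is None:
--             # Use current abbreviation if none given in text.
--             abbreviation = current_part['abbreviation']
--         else:
--             # Use given abbreviation.
--             pass
--         #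
--         if current_part['abbreviation'] is None and not current_part['lines']:
--             # First part, so initialize its abbreviation.
--             current_part['abbreviation'] = abbreviation
--         elif abbreviation != current_part['abbreviation']:
--             # New speaker found; add to a new part.
--             append_part_if_not_empty()
--             current_part = new_part(abbreviation)
--         else:
--             # Existing speaker; add to existing part.
--             pass
--         #
--         append_line(text)
--     # All done, append the final part.
--     append_part_if_not_empty()
--     return parts
--
-- def normalized_text(original_text):
--     """Return a normalized rendition of the given original text."""
--     return u'\n\n'.join(
--         '\n'.join(
--             u'{abbreviation};{line}'.format(
--                 abbreviation=(part['abbreviation'] or '') if index == 0 else '',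
--                 line=line,
--             )
--             for index, line
--             in enumerate(part['lines'])
--         )
--         for part
--         in dialogue_list(original_text)
--     )
-- ===== SOURCE B (Python) =====
-- def normalized_text(original_text):
--     """Return a normalized rendition of the given original text."""
--     # Pass 1: flatten into (resolved_speaker, text) entries, inheriting the
--     # current speaker and skipping blank-text lines.
--     entries = []
--     current = None
--     for raw in original_text.splitlines():
--         line = raw.strip()
--         if ';' in line:
--             abbr, text = line.split(';', 1)
--             abbr = abbr.strip() or None
--             text = text.strip()
--         else:
--             abbr, text = None, line
--         if not text:
--             continue
--         if abbr is None:
--             abbr = current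
--         entries.append((abbr, text))
--         current = abbr
--     # Pass 2: group consecutive entries with the same speaker.
--     groups = []
--     for speaker, text in entries:
--         if groups and groups[-1][0] == speaker:
--             groups[-1][1].append(text)
--         else:
--             groups.append((speaker, [text]))
--     # Pass 3: render each group; only its first line carries the speaker.
--     return '\n\n'.join(
--         '\n'.join(
--             ('%s;%s' % (speaker or '', text)) if i == 0 else ';' + text
--             for i, text in enumerate(texts))
--         for speaker, texts in groups)
-- ===== Notes on version B (the rewrite author's own statement) =====
-- stated objective: simpler
-- what changed: Replaces the single stateful pass over mutable part-dicts (with nested helper closures and a four-way branch maintaining parts and the open part) by three plain phases: flatten to (resolved speaker, text) pairs with one scalar speaker variable, group consecutive equal speakers, then render each group.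
import Mathlib
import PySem

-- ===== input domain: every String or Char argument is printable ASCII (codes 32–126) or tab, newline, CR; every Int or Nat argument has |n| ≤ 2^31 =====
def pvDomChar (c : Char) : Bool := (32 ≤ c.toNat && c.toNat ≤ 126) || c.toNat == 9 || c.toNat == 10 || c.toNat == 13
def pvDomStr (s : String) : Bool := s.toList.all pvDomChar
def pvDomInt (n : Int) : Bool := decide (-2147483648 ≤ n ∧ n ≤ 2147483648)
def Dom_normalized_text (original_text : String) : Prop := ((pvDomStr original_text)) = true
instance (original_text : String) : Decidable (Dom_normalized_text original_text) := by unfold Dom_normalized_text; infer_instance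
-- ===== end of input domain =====

-- B replaces A's single stateful pass over mutable part-dicts by three plain phases
-- (flatten to (speaker, text) pairs, group consecutive equal speakers, render); simpler decomposition, same O(n) cost.

-- ===== PORT A =====
structure PartA where
  abbr : Option String
  lines : List String
deriving DecidableEq, Repr

-- one iteration of A's `for line in original_text.splitlines()` loop; state = (parts, current_part)
def stepA (st : List PartA × PartA) (rawline : String) : List PartA × PartA :=
  let parts := st.1
  let cp := st.2
  let line := PySem.Str.strip rawline
  let at2 : Option String × String :=
    if !PySem.Str.isIn ";" line then
      -- Only text was given: abbreviation = current_part['abbreviation'] or None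
      ((match cp.abbr with | some a => if a = "" then none else some a | none => none),
       PySem.Str.strip line)
    else
      match PySem.Str.splitMax? line ";" 1 with
      | some (a :: t :: _) =>
          ((let a' := PySem.Str.strip a; if a' = "" then none else some a'), PySem.Str.strip t)
      | _ => (none, "")   -- unreachable: sep ";" ≠ "" and ";" ∈ line gives two pieces
  let text := at2.2
  if text = "" then (parts, cp)             -- skip blank line
  else
    let abbreviation := match at2.1 with | none => cp.abbr | some a => some a
    if cp.abbr = none ∧ cp.lines = [] then
      -- first part: initialize its abbreviation, then append_line
      (parts, ⟨abbreviation, cp.lines ++ [text]⟩)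
    else if abbreviation ≠ cp.abbr then
      -- new speaker: append_part_if_not_empty, new part, append_line
      ((if cp.lines ≠ [] then parts ++ [cp] else parts), ⟨abbreviation, [text]⟩)
    else
      (parts, ⟨cp.abbr, cp.lines ++ [text]⟩)

def dialogue_list (original_text : String) : List PartA :=
  let st := (PySem.Str.splitlines original_text).foldl stepA ([], ⟨none, []⟩)
  if st.2.lines ≠ [] then st.1 ++ [st.2] else st.1

def normalized_text (original_text : String) : String :=
  PySem.Str.join "\n\n" ((dialogue_list original_text).map (fun part =>
    PySem.Str.join "\n" ((PySem.List.enumerate part.lines).map (fun il =>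
      (if il.1 = 0 then part.abbr.getD "" else "") ++ ";" ++ il.2))))

-- ===== PORT B =====
-- pass 1: flatten to (resolved speaker, text) entries; state = (entries, current)
def stepB (st : List (Option String × String) × Option String) (raw : String) :
    List (Option String × String) × Option String :=
  let entries := st.1
  let current := st.2
  let line := PySem.Str.strip raw
  let at2 : Option String × String :=
    if PySem.Str.isIn ";" line then
      match PySem.Str.splitMax? line ";" 1 with
      | some (a :: t :: _) =>
          ((let a' := PySem.Str.strip a; if a' = "" then none else some a'), PySem.Str.strip t)
      | _ => (none, "")
    else (none, line)
  if at2.2 = "" then (entries, current)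
  else
    let abbr := match at2.1 with | none => current | some a => some a
    (entries ++ [(abbr, at2.2)], abbr)

-- pass 2: group consecutive entries with the same speaker (B's groups[-1] append)
def groupStep (gs : List (Option String × List String)) (e : Option String × String) :
    List (Option String × List String) :=
  match gs.getLast? with
  | some g => if g.1 = e.1 then gs.dropLast ++ [(g.1, g.2 ++ [e.2])] else gs ++ [(e.1, [e.2])]
  | none => [(e.1, [e.2])]

def normalized_text_alt (original_text : String) : String :=
  PySem.Str.join "\n\n" ((((((PySem.Str.splitlines original_text).foldl stepB ([], none)).1).foldl groupStep [])).map (fun g =>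
    PySem.Str.join "\n" ((PySem.List.enumerate g.2).map (fun il =>
      if il.1 = 0 then g.1.getD "" ++ ";" ++ il.2 else ";" ++ il.2))))

-- ===== PRECONDITION & SPEC =====
def Spec_normalized_text (original_text : String) (out : String) : Prop := out = normalized_text_alt original_text
instance (original_text : String) (out : String) : Decidable (Spec_normalized_text original_text out) := by unfold Spec_normalized_text; infer_instance

-- ===== CLAIM (what is proved, stated in full; the proofs are below) =====
def Claim_equal_normalized_text : Prop := ∀ (original_text : String), Dom_normalized_text original_text → Spec_normalized_text original_text (normalized_text original_text)

-- ===== LEMMAS AND PROOFS =====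

-- grouping of a flat entry list, computed front-to-back (proof-side model of B's pass 2)
def grpAux (k : Option String) (ts : List String) :
    List (Option String × String) → List (Option String × List String)
  | [] => [(k, ts)]
  | e :: es => if k = e.1 then grpAux k (ts ++ [e.2]) es else (k, ts) :: grpAux e.1 [e.2] es

def grpFold : List (Option String × String) → List (Option String × List String)
  | [] => []
  | e :: es => grpAux e.1 [e.2] es

def pairsOf (p : PartA) : Option String × List String := (p.abbr, p.lines)

theorem grpAux_ne_nil (es : List (Option String × String)) :
    ∀ k ts, grpAux k ts es ≠ [] := by
  induction es with
  | nil => intro k ts; simp [grpAux]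
  | cons e es ih =>
    intro k ts
    simp only [grpAux]
    split
    · exact ih _ _
    · simp

theorem groupStep_cons (x : Option String × List String)
    (gs : List (Option String × List String)) (e : Option String × String)
    (h : gs ≠ []) : groupStep (x :: gs) e = x :: groupStep gs e := by
  unfold groupStep
  have hlast : (x :: gs).getLast? = gs.getLast? := by
    cases gs with
    | nil => simp at h
    | cons y ys => simp [List.getLast?_cons_cons]
  rw [hlast, List.dropLast_cons_of_ne_nil h]
  cases hg : gs.getLast? with
  | none => simp [List.getLast?_eq_none_iff.mp hg] at h
  | some g => split <;> simp_all [apply_ite]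

theorem grpAux_snoc (es : List (Option String × String)) :
    ∀ k ts e, grpAux k ts (es ++ [e]) = groupStep (grpAux k ts es) e := by
  induction es with
  | nil =>
    intro k ts e
    by_cases h : k = e.1 <;> simp [grpAux, groupStep, h]
  | cons e' es ih =>
    intro k ts e
    simp only [List.cons_append, grpAux]
    split
    · exact ih _ _ _
    · rw [ih, groupStep_cons _ _ _ (grpAux_ne_nil _ _ _)]

theorem grpFold_snoc (es : List (Option String × String)) (e : Option String × String) :
    grpFold (es ++ [e]) = groupStep (grpFold es) e := by
  cases es with
  | nil => simp [grpFold, groupStep, grpAux]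
  | cons e' es => simp only [List.cons_append, grpFold]; exact grpAux_snoc _ _ _ _

theorem foldl_groupStep_eq_grpFold (es : List (Option String × String)) :
    es.foldl groupStep [] = grpFold es := by
  induction es using List.reverseRecOn with
  | nil => rfl
  | append_singleton es e ih => rw [List.foldl_append, List.foldl_cons, List.foldl_nil, ih, grpFold_snoc]

-- strip is idempotent (A re-strips an already-stripped line; B does not)
theorem chars_rstrip_prefix (u : List Char) : PySem.Chars.rstrip u <+: u := by
  have h := List.dropWhile_suffix (l := u.reverse) (p := PySem.Chars.isspace)
  have := List.reverse_prefix.mpr (by simpa using h)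
  simpa [PySem.Chars.rstrip] using this

theorem chars_lstrip_head (u : List Char) :
    ∀ c ∈ (PySem.Chars.lstrip u).head?, PySem.Chars.isspace c = false := by
  intro c hc
  have := List.head?_dropWhile_not PySem.Chars.isspace u
  simp only [PySem.Chars.lstrip] at hc
  cases hh : (List.dropWhile PySem.Chars.isspace u).head? with
  | none => simp [hh] at hc
  | some d =>
    rw [hh] at hc this
    simp at hc
    subst hc
    simpa using this

theorem chars_strip_idem (s : List Char) :
    PySem.Chars.strip (PySem.Chars.strip s) = PySem.Chars.strip s := by
  have hls : PySem.Chars.lstrip (PySem.Chars.rstrip (PySem.Chars.lstrip s))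
      = PySem.Chars.rstrip (PySem.Chars.lstrip s) := by
    set u := PySem.Chars.lstrip s with hu
    cases hr : PySem.Chars.rstrip u with
    | nil => simp [PySem.Chars.lstrip]
    | cons c cs =>
      have hpre : PySem.Chars.rstrip u <+: u := chars_rstrip_prefix u
      rw [hr] at hpre
      have hc : c ∈ u.head? := by
        obtain ⟨t, ht⟩ := hpre
        simp [← ht]
      have hcu : u.head? = some c := by
        cases hh : u.head? with
        | none => simp [hh] at hc
        | some d => rw [hh] at hc; simp at hc; rw [hc]
      have hns : PySem.Chars.isspace c = false := by
        apply chars_lstrip_head s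
        rw [← hu, hcu]; simp
      simp [PySem.Chars.lstrip, hns]
  have hrr : PySem.Chars.rstrip (PySem.Chars.rstrip (PySem.Chars.lstrip s))
      = PySem.Chars.rstrip (PySem.Chars.lstrip s) := by
    simp [PySem.Chars.rstrip, List.dropWhile_idempotent]
  simp only [PySem.Chars.strip]
  rw [hls, hrr]

theorem str_strip_idem (s : String) :
    PySem.Str.strip (PySem.Str.strip s) = PySem.Str.strip s := by
  simp [PySem.Str.strip, chars_strip_idem]

-- the invariant tying A's loop state to B's
def StInv (sA : List PartA × PartA) (sB : List (Option String × String) × Option String) : Prop :=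
  sA.2.abbr ≠ some "" ∧
  ((sA.2.lines = [] ∧ sA.1 = [] ∧ sA.2.abbr = none ∧ sB.1 = [] ∧ sB.2 = none)
   ∨ (sA.2.lines ≠ [] ∧ sB.2 = sA.2.abbr ∧
      grpFold sB.1 = sA.1.map pairsOf ++ [(sA.2.abbr, sA.2.lines)]))

theorem StInv_push (parts : List PartA) (cp : PartA) (entries : List (Option String × String))
    (cur : Option String) (habbr : cp.abbr ≠ some "")
    (hcase : (cp.lines = [] ∧ parts = [] ∧ cp.abbr = none ∧ entries = [] ∧ cur = none)
      ∨ (cp.lines ≠ [] ∧ cur = cp.abbr ∧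
         grpFold entries = parts.map pairsOf ++ [(cp.abbr, cp.lines)]))
    (r : Option String) (txt : String) (hr : r ≠ some "") :
    StInv (if cp.abbr = none ∧ cp.lines = [] then (parts, ⟨r, cp.lines ++ [txt]⟩)
           else if r ≠ cp.abbr then ((if cp.lines ≠ [] then parts ++ [cp] else parts), ⟨r, [txt]⟩)
           else (parts, ⟨cp.abbr, cp.lines ++ [txt]⟩))
          (entries ++ [(r, txt)], r) := by
  rcases hcase with ⟨h1, h2, h3, h4, h5⟩ | ⟨h1, h2, h3⟩
  · subst h2 h4
    rw [if_pos ⟨h3, h1⟩, h1]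
    exact ⟨hr, Or.inr ⟨by simp, rfl, by simp [grpFold, grpAux]⟩⟩
  · rw [if_neg (fun hc => h1 hc.2)]
    by_cases hne : r ≠ cp.abbr
    · rw [if_pos hne, if_pos h1]
      refine ⟨hr, Or.inr ⟨by simp, rfl, ?_⟩⟩
      rw [grpFold_snoc, h3, groupStep, List.getLast?_concat]
      simp only
      rw [if_neg (fun hc => hne hc.symm)]
      simp [pairsOf]
    · rw [not_not] at hne
      rw [if_neg (by simp [hne])]
      refine ⟨habbr, Or.inr ⟨by simp, hne, ?_⟩⟩
      rw [grpFold_snoc, h3, groupStep, List.getLast?_concat]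
      simp only
      rw [if_pos hne.symm, List.dropLast_concat]

set_option maxHeartbeats 1000000 in
theorem StInv_step (sA : List PartA × PartA) (sB : List (Option String × String) × Option String)
    (h : StInv sA sB) (l : String) : StInv (stepA sA l) (stepB sB l) := by
  obtain ⟨habbr, hcase⟩ := h
  obtain ⟨parts, cp⟩ := sA
  obtain ⟨entries, cur⟩ := sB
  simp only at habbr hcase
  have hcur : cur = cp.abbr := by
    rcases hcase with ⟨_, _, h3, _, h5⟩ | ⟨_, h2, _⟩
    · rw [h5, h3]
    · exact h2
  subst hcur
  simp only [stepA, stepB]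
  by_cases hsemi : PySem.Str.isIn ";" (PySem.Str.strip l) = true
  · simp only [hsemi, Bool.not_true, Bool.false_eq_true, if_false, if_true]
    cases hsp : PySem.Str.splitMax? (PySem.Str.strip l) ";" 1 with
    | none =>
      exact ⟨habbr, hcase⟩
    | some pieces =>
      cases pieces with
      | nil => exact ⟨habbr, hcase⟩
      | cons a rest =>
        cases rest with
        | nil => exact ⟨habbr, hcase⟩
        | cons t rest' =>
          simp only []
          by_cases htxt : PySem.Str.strip t = ""
          · rw [if_pos htxt, if_pos htxt]
            exact ⟨habbr, hcase⟩
          · rw [if_neg htxt, if_neg htxt]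
            by_cases hae : PySem.Str.strip a = ""
            · rw [if_pos hae]
              simp only []
              exact StInv_push parts cp entries cp.abbr habbr hcase cp.abbr
                (PySem.Str.strip t) habbr
            · rw [if_neg hae]
              simp only []
              exact StInv_push parts cp entries cp.abbr habbr hcase (some (PySem.Str.strip a))
                (PySem.Str.strip t) (by simp [hae])
  · have hsemi2 : PySem.Str.isIn ";" (PySem.Str.strip l) = false := by
      simpa using hsemi
    simp only [hsemi2, Bool.not_false, if_true, Bool.false_eq_true, if_false, str_strip_idem]
    by_cases hle : PySem.Str.strip l = ""
    · rw [if_pos hle, if_pos hle]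
      exact ⟨habbr, hcase⟩
    · rw [if_neg hle, if_neg hle]
      cases hcpa : cp.abbr with
      | none =>
        have := StInv_push parts cp entries cp.abbr habbr hcase cp.abbr
          (PySem.Str.strip l) habbr
        rw [hcpa] at this
        simpa using this
      | some ab =>
        have hab : ab ≠ "" := fun hc => habbr (by rw [hcpa, hc])
        simp only [if_neg hab]
        have := StInv_push parts cp entries cp.abbr habbr hcase cp.abbr
          (PySem.Str.strip l) habbr
        rw [hcpa] at this
        simpa using this

set_option maxHeartbeats 2000000 in
theorem StInv_foldl (ls : List String) :
    ∀ sA sB, StInv sA sB → StInv (ls.foldl stepA sA) (ls.foldl stepB sB) := by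
  induction ls with
  | nil => intro sA sB h; exact h
  | cons l ls ih => intro sA sB h; exact ih _ _ (StInv_step sA sB h l)

theorem dialogue_pairs (s : String) :
    (dialogue_list s).map pairsOf
      = grpFold ((PySem.Str.splitlines s).foldl stepB ([], none)).1 := by
  have h0 : StInv ([], ⟨none, []⟩) ([], none) := by
    refine ⟨by simp, Or.inl ?_⟩
    simp
  have h := StInv_foldl (PySem.Str.splitlines s) _ _ h0
  unfold dialogue_list
  obtain ⟨hne, hcase⟩ := h
  rcases hcase with ⟨h1, h2, h3, h4, h5⟩ | ⟨h1, h2, h3⟩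
  · simp [h1, h2, h4, grpFold]
  · rw [if_pos h1, h3]
    simp [pairsOf]

--  the two render functions agree on pairs
theorem render_eq (g : Option String × List String) :
    PySem.Str.join "\n" ((PySem.List.enumerate g.2).map (fun il =>
      (if il.1 = 0 then g.1.getD "" else "") ++ ";" ++ il.2))
    = PySem.Str.join "\n" ((PySem.List.enumerate g.2).map (fun il =>
      if il.1 = 0 then g.1.getD "" ++ ";" ++ il.2 else ";" ++ il.2)) := by
  congr 1
  apply List.map_congr_left
  intro il _
  by_cases h : il.1 = 0 <;> simp [h]

-- ===== VERDICT (by name: the statement is the Claim_ definition above) =====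
theorem normalized_text_spec : Claim_equal_normalized_text := by
  intro s _
  unfold Spec_normalized_text normalized_text normalized_text_alt
  rw [foldl_groupStep_eq_grpFold, ← dialogue_pairs]
  rw [List.map_map]
  congr 1
  apply List.map_congr_left
  intro part _
  simpa [pairsOf] using render_eq (pairsOf part)
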